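-- pv_equiv track=rewrite | github.com/swp-berlin/ru_budget_tracker | src/scripts/parse_dimensions.py | extract_expense_type_name_from_parentheses
-- ===== SOURCE A (Python) =====
-- def extract_expense_type_name_from_parentheses(full_text: str) -> str:
--     """
--     Extract expense type name from the last parenthesis pair in text.
--     If no parenthesis found, return full text.
--
--     Args:
--         full_text: The complete text that may contain parentheses
--
--     Returns:
--         Extracted text from last parenthesis, or full text if no parenthesis
--     """
--     # Simple approach: find the LAST closing parenthesis and its matching opening
--     last_close_pos = full_text.rfind(')')
--
--     if last_close_pos != -1:
--         # Found a closing paren - now find its matching opening by going backwards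
--         depth = 0
--         matching_open = -1
--
--         for i in range(last_close_pos - 1, -1, -1):
--             if full_text[i] in (')', '）', '\uff09'):
--                 depth += 1
--             elif full_text[i] in ('(', '（', '\uff08'):
--                 if depth == 0:
--                     matching_open = i
--                     break
--                 depth -= 1
--
--         if matching_open != -1:
--             # Extract content between matching pair
--             return full_text[matching_open + 1:last_close_pos].strip()
--
--     # No parenthesis found or couldn't match - return full text
--     return full_text
-- ===== SOURCE B (Python) =====
-- def extract_expense_type_name_from_parentheses(full_text: str) -> str:
--     """Forward single pass with an explicit stack of opener indices
--     (instead of A's backward depth-counting scan from the last ')')."""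
--     last_close_pos = full_text.rfind(')')
--     if last_close_pos == -1:
--         return full_text
--     stack = []
--     for i, ch in enumerate(full_text[:last_close_pos]):
--         if ch in ('(', '（', '\uff08'):
--             stack.append(i)
--         elif ch in (')', '）', '\uff09'):
--             if stack:
--                 stack.pop()
--     if stack:
--         return full_text[stack[-1] + 1:last_close_pos].strip()
--     return full_text
-- ===== Notes on version B (the rewrite author's own statement) =====
-- stated objective: alternative
-- what changed: Replaced A's backward depth-counting scan from the last closing parenthesis by a single forward pass that maintains an explicit stack of opener indices and reads the matching opener off the top of the stack.
import Mathlib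
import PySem

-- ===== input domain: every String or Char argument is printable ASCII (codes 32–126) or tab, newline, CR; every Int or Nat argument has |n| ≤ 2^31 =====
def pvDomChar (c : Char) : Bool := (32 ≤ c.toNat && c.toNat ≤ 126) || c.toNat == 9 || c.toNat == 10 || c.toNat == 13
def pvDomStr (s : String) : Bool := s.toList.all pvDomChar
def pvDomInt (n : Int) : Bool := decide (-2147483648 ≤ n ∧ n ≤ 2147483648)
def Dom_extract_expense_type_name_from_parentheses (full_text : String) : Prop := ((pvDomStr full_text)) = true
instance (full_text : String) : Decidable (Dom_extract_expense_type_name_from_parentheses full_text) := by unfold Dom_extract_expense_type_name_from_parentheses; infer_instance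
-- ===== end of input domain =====

-- B replaces A's backward depth-counting scan by one forward pass with an explicit stack of opener indices; same cost, different traversal (objective: alternative).

-- ===== PORT A =====
-- A's backward loop 'for i in range(last_close_pos - 1, -1, -1)' with break:
-- returns the matching_open index, or -1 if the loop ends without break.
-- ('）' IS '\uff09' and '（' IS '\uff08', so each Python 3-tuple membership test is a 2-way disjunction.)
def pvLoopA (s : String) : List Int → Int → Int
  | [], _ => -1
  | i :: rest, depth =>
    match PySem.Str.pyGet? s i with
    | none => -1   -- unreachable: every i produced by the range is a valid index
    | some c =>
      if c = ')' ∨ c = '）' then pvLoopA s rest (depth + 1)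
      else if c = '(' ∨ c = '（' then
        if depth = 0 then i else pvLoopA s rest (depth - 1)
      else pvLoopA s rest depth

def extract_expense_type_name_from_parentheses (full_text : String) : String :=
  let last_close_pos := PySem.Str.rfind full_text ")"
  if last_close_pos ≠ -1 then
    let matching_open := pvLoopA full_text (PySem.List.pyRange (last_close_pos - 1) (-1) (-1)) 0
    if matching_open ≠ -1 then
      PySem.Str.strip (PySem.Str.slice full_text (some (matching_open + 1)) (some last_close_pos))
    else full_text
  else full_text

-- ===== PORT B =====
-- B's forward loop over enumerate(full_text[:last_close_pos]) maintaining the stack of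
-- opener indices; Python appends/pops at the END of the list, here the top is the HEAD,
-- so Python's stack[-1] is the head of the Lean stack.
def pvLoopB : List (Int × Char) → List Int → List Int
  | [], stack => stack
  | (i, ch) :: rest, stack =>
    if ch = '(' ∨ ch = '（' then pvLoopB rest (i :: stack)
    else if ch = ')' ∨ ch = '）' then
      match stack with
      | [] => pvLoopB rest []
      | _ :: tl => pvLoopB rest tl
    else pvLoopB rest stack

def extract_expense_type_name_from_parentheses_alt (full_text : String) : String :=
  let last_close_pos := PySem.Str.rfind full_text ")"
  if last_close_pos = -1 then full_text
  else
    let stack := pvLoopB (PySem.List.enumerate (PySem.Str.slice full_text none (some last_close_pos)).toList 0) []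
    match stack with
    | top :: _ => PySem.Str.strip (PySem.Str.slice full_text (some (top + 1)) (some last_close_pos))
    | [] => full_text

-- ===== PRECONDITION & SPEC =====
def Spec_extract_expense_type_name_from_parentheses (full_text : String) (out : String) : Prop := out = extract_expense_type_name_from_parentheses_alt full_text
instance (full_text : String) (out : String) : Decidable (Spec_extract_expense_type_name_from_parentheses full_text out) := by unfold Spec_extract_expense_type_name_from_parentheses; infer_instance

-- ===== CLAIM (what is proved, stated in full; the proofs are below) =====
def Claim_equal_extract_expense_type_name_from_parentheses : Prop := ∀ (full_text : String), Dom_extract_expense_type_name_from_parentheses full_text → Spec_extract_expense_type_name_from_parentheses full_text (extract_expense_type_name_from_parentheses full_text)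

-- ===== LEMMAS AND PROOFS =====

-- A's loop with the character of each index substituted in (proof-only mirror of pvLoopA).
def pvBscan : List (Int × Char) → Int → Int
  | [], _ => -1
  | (i, c) :: rest, depth =>
    if c = ')' ∨ c = '）' then pvBscan rest (depth + 1)
    else if c = '(' ∨ c = '（' then
      if depth = 0 then i else pvBscan rest (depth - 1)
    else pvBscan rest depth

theorem pvLoopA_eq_bscan (s : String) (l : List (Int × Char))
    (h : ∀ p ∈ l, PySem.Str.pyGet? s p.1 = some p.2) (d : Int) :
    pvLoopA s (l.map Prod.fst) d = pvBscan l d := by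
  induction l generalizing d with
  | nil => rfl
  | cons p rest ih =>
    obtain ⟨i, c⟩ := p
    have hc : PySem.Str.pyGet? s i = some c := h (i, c) (by simp)
    have hrest : ∀ p ∈ rest, PySem.Str.pyGet? s p.1 = some p.2 := fun p hp => h p (by simp [hp])
    simp only [List.map_cons, pvLoopA, pvBscan, hc]
    split_ifs <;> simp [ih hrest]

theorem pvLoopB_append (l₁ l₂ : List (Int × Char)) (st : List Int) :
    pvLoopB (l₁ ++ l₂) st = pvLoopB l₂ (pvLoopB l₁ st) := by
  induction l₁ generalizing st with
  | nil => rfl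
  | cons p rest ih =>
    obtain ⟨i, c⟩ := p
    simp only [List.cons_append, pvLoopB]
    split_ifs <;> first
      | exact ih _
      | (cases st <;> exact ih _)

theorem pvBscan_reverse_eq_getD (l : List (Int × Char)) (d : Nat) :
    pvBscan l.reverse (d : Int) = (pvLoopB l []).getD d (-1) := by
  induction l using List.reverseRecOn generalizing d with
  | nil => cases d <;> rfl
  | append_singleton l p ih =>
    obtain ⟨i, c⟩ := p
    rw [List.reverse_append, pvLoopB_append]
    simp only [List.reverse_singleton, List.singleton_append]
    by_cases hcl : c = ')' ∨ c = '）' <;> by_cases hop : c = '(' ∨ c = '（'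
    · exfalso; rcases hcl with rfl | rfl <;> rcases hop with h | h <;> simp_all
    · -- closing paren: pop
      simp only [pvBscan, pvLoopB, if_pos hcl, if_neg hop]
      have hcast : (d : Int) + 1 = ((d + 1 : Nat) : Int) := by push_cast; ring
      rw [hcast, ih (d + 1)]
      cases pvLoopB l [] <;> simp [List.getD]
    · -- opening paren: push
      simp only [pvBscan, pvLoopB, if_neg hcl, if_pos hop]
      by_cases hd : d = 0
      · subst hd; simp [List.getD]
      · have hdz : ¬ ((d : Int) = 0) := by exact_mod_cast hd
        rw [if_neg hdz]
        obtain ⟨d', rfl⟩ : ∃ d', d = d' + 1 := ⟨d - 1, by omega⟩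
        have hcast : (((d' + 1 : Nat)) : Int) - 1 = ((d' : Nat) : Int) := by push_cast; ring
        rw [hcast, ih d']
        simp [List.getD]
    · simp only [pvBscan, pvLoopB, if_neg hcl, if_neg hop]
      exact ih d

theorem pvEnum_mem {α : Type} (xs : List α) (s : Int) (i : Int) (a : α)
    (h : (i, a) ∈ PySem.List.enumerate xs s) :
    ∃ k : Nat, k < xs.length ∧ i = s + k ∧ xs[k]? = some a := by
  induction xs generalizing s with
  | nil => simp [PySem.List.enumerate_nil] at h
  | cons x rest ih =>
    rw [PySem.List.enumerate_cons] at h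
    rcases List.mem_cons.mp h with h | h
    · refine ⟨0, by simp, ?_, ?_⟩ <;> simp_all
    · obtain ⟨k, hk, hi, hg⟩ := ih (s + 1) h
      exact ⟨k + 1, by simpa using hk, by push_cast; omega, by simpa using hg⟩

theorem pvEnum_map_fst {α : Type} (xs : List α) (s : Int) :
    (PySem.List.enumerate xs s).map Prod.fst = List.map (fun (k : Nat) => s + (k : Int)) (List.range xs.length) := by
  induction xs generalizing s with
  | nil => simp [PySem.List.enumerate_nil]
  | cons x rest ih =>
    rw [PySem.List.enumerate_cons, List.length_cons, List.range_succ_eq_map, List.map_cons,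
        List.map_cons, List.map_map, ih (s + 1)]
    congr 1
    · simp
    · apply List.map_congr_left; intro k _
      simp only [Function.comp_apply]; push_cast; ring

theorem pvLoopB_nonneg (l : List (Int × Char)) (st : List Int)
    (hl : ∀ p ∈ l, 0 ≤ p.1) (hst : ∀ x ∈ st, 0 ≤ x) :
    ∀ x ∈ pvLoopB l st, 0 ≤ x := by
  induction l generalizing st with
  | nil => simpa [pvLoopB] using hst
  | cons p rest ih =>
    obtain ⟨i, c⟩ := p
    have hi : (0:Int) ≤ i := hl (i, c) (by simp)
    have hrest : ∀ p ∈ rest, 0 ≤ p.1 := fun p hp => hl p (by simp [hp])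
    simp only [pvLoopB]
    split_ifs
    · exact ih _ hrest (by intro x hx; rcases List.mem_cons.mp hx with rfl | hx; exact hi; exact hst x hx)
    · cases st with
      | nil => exact ih _ hrest (by simp)
      | cons a tl => exact ih _ hrest (fun x hx => hst x (List.mem_cons_of_mem a hx))
    · exact ih _ hrest hst

theorem pvRfind_go_bound (s sub : List Char) (j : Nat) :
    PySem.Chars.rfind.go s sub j = -1 ∨
      (0 ≤ PySem.Chars.rfind.go s sub j ∧ PySem.Chars.rfind.go s sub j ≤ (j : Int)) := by
  induction j with
  | zero =>
    unfold PySem.Chars.rfind.go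
    split_ifs <;> simp
  | succ j ih =>
    unfold PySem.Chars.rfind.go
    split_ifs with h
    · right; constructor <;> [positivity; simp]
    · rcases ih with h' | ⟨h1, h2⟩
      · left; exact h'
      · right; exact ⟨h1, by omega⟩

theorem pvRfind_bound (s : String) (h : PySem.Str.rfind s ")" ≠ -1) :
    0 ≤ PySem.Str.rfind s ")" ∧ PySem.Str.rfind s ")" ≤ (s.toList.length : Int) := by
  rw [PySem.Str.rfind_eq] at h ⊢
  unfold PySem.Chars.rfind at h ⊢
  rcases pvRfind_go_bound s.toList ")".toList s.toList.length with h' | h'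
  · exact absurd h' h
  · exact h'

-- ===== VERDICT (by name: the statement is the Claim_ definition above) =====
theorem extract_expense_type_name_from_parentheses_spec : Claim_equal_extract_expense_type_name_from_parentheses := by
  intro s _
  show _ = extract_expense_type_name_from_parentheses_alt s
  unfold extract_expense_type_name_from_parentheses extract_expense_type_name_from_parentheses_alt
  set p := PySem.Str.rfind s ")" with hp
  by_cases h1 : p = -1
  · simp [h1]
  · obtain ⟨hp0, hplen⟩ := pvRfind_bound s (by rw [← hp]; exact h1)
    simp only [if_neg h1, if_pos h1, ne_eq]
    -- identify the enumerated prefix on both sides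
    have hslice : (PySem.Str.slice s none (some p)).toList = s.toList.take p.toNat := by
      rw [PySem.Str.toList_slice, PySem.Chars.slice_eq_listSlice, PySem.List.slice_to _ hp0]
    set e := PySem.List.enumerate (s.toList.take p.toNat) (0 : Int) with he
    have hlen_take : (s.toList.take p.toNat).length = p.toNat := by
      rw [List.length_take]; omega
    -- A's countdown index list is the reverse of e's indices
    have hrange : PySem.List.pyRange (p - 1) (-1) (-1) = (e.map Prod.fst).reverse := by
      rw [PySem.List.pyRange_neg_one_eq_reverse]
      have h0 : (-1 : Int) + 1 = 0 := by ring
      rw [h0, sub_add_cancel, he, pvEnum_map_fst, hlen_take, PySem.List.pyRange_one, sub_zero]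
    -- every enumerated pair is a valid lookup into s
    have hmem : ∀ q ∈ e.reverse, PySem.Str.pyGet? s q.1 = some q.2 := by
      intro ⟨i, c⟩ hq
      rw [List.mem_reverse] at hq
      obtain ⟨k, hk, hik, hg⟩ := pvEnum_mem _ _ _ _ hq
      rw [hlen_take] at hk
      have : i = (k : Int) := by omega
      subst this
      rw [PySem.Str.pyGet?_natCast]
      rw [List.getElem?_take] at hg
      simpa [hk] using hg
    have hA : pvLoopA s (PySem.List.pyRange (p - 1) (-1) (-1)) 0 = pvBscan e.reverse 0 := by
      rw [hrange, ← List.map_reverse, pvLoopA_eq_bscan s e.reverse hmem]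
    have hB : pvBscan e.reverse 0 = (pvLoopB e []).getD 0 (-1) := by
      simpa using pvBscan_reverse_eq_getD e 0
    have hnn : ∀ x ∈ pvLoopB e [], 0 ≤ x := by
      apply pvLoopB_nonneg
      · intro ⟨i, c⟩ hq
        obtain ⟨k, _, hik, _⟩ := pvEnum_mem _ _ _ _ hq
        simp only
        omega
      · simp
    rw [hslice, ← he]
    cases hst : pvLoopB e [] with
    | nil =>
      have : pvLoopA s (PySem.List.pyRange (p - 1) (-1) (-1)) 0 = -1 := by
        rw [hA, hB, hst]; rfl
      simp [this]
    | cons top tl =>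
      have htop : 0 ≤ top := hnn top (by rw [hst]; simp)
      have : pvLoopA s (PySem.List.pyRange (p - 1) (-1) (-1)) 0 = top := by
        rw [hA, hB, hst]; rfl
      rw [this, if_pos (by omega)]
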